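-- pv_equiv track=rewrite | github.com/thealper2/codewars-solutions | 7-kyu/make_your_own_hashmap.py | my_hash_map
-- ===== SOURCE A (Python) =====
-- def my_hash_map(list_of_strings):
--     hash_dict = {}
--     for s in list_of_strings:
--         hash_val = sum(ord(c) for c in s)
--         if hash_val not in hash_dict:
--             hash_dict[hash_val] = []
--
--         hash_dict[hash_val].append(s)
--
--     return hash_dict
-- ===== SOURCE B (Python) =====
-- def my_hash_map(list_of_strings):
--     keys = [sum(map(ord, s)) for s in list_of_strings]
--     return {k: [s for s, h in zip(list_of_strings, keys) if h == k]
--             for k in dict.fromkeys(keys)}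
-- ===== Notes on version B (the rewrite author's own statement) =====
-- stated objective: alternative
-- what changed: A builds the grouping dict in one pass with in-place list appends; B computes all hashes once, takes the distinct hashes in first-occurrence order (dict.fromkeys) and builds each group by filtering the zipped (string, hash) list, a distinct-keys-then-filter nested scan.
import Mathlib
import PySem

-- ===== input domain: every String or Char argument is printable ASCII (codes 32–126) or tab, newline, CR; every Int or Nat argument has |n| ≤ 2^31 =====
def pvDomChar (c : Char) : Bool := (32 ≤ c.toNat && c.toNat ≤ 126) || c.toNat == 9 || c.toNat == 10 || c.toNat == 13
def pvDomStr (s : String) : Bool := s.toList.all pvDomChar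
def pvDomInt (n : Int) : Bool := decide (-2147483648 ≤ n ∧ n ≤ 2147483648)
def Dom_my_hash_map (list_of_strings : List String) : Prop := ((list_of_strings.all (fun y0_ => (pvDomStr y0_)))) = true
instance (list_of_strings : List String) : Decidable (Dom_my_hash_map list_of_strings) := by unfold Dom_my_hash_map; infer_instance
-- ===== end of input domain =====

-- B groups by the same char-code-sum key with a distinct-keys-then-filter nested scan instead of A's
-- single-pass dict accumulation; objective: alternative (same result, different algorithm, not faster).

-- sum(ord(c) for c in s), used by both Pythons verbatim
def pvOrdSum (s : String) : Int := (s.toList.map (fun c => (c.toNat : Int))).sum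

-- ===== PORT A =====
def my_hash_map (list_of_strings : List String) : List (Int × List String) :=
  (list_of_strings.foldl
    (fun hash_dict s =>
      let hash_val := pvOrdSum s
      let hash_dict' := if hash_dict.contains hash_val then hash_dict
                        else hash_dict.insert hash_val []
      hash_dict'.modify hash_val [] (fun l => l ++ [s]))
    PySem.Dict.empty).items

-- ===== PORT B =====
def my_hash_map_alt (list_of_strings : List String) : List (Int × List String) :=
  let keys := list_of_strings.map pvOrdSum
  (PySem.List.dedup keys).map
    (fun k => (k, ((list_of_strings.zip keys).filter (fun p => p.2 == k)).map (fun p => p.1)))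

-- ===== PRECONDITION & SPEC =====
def Spec_my_hash_map (list_of_strings : List String) (out : List (Int × List String)) : Prop := out = my_hash_map_alt list_of_strings
instance (list_of_strings : List String) (out : List (Int × List String)) : Decidable (Spec_my_hash_map list_of_strings out) := by unfold Spec_my_hash_map; infer_instance

-- ===== CLAIM (what is proved, stated in full; the proofs are below) =====
def Claim_equal_my_hash_map : Prop := ∀ (list_of_strings : List String), Dom_my_hash_map list_of_strings → Spec_my_hash_map list_of_strings (my_hash_map list_of_strings)

-- ===== LEMMAS AND PROOFS =====

-- A's "insert-[]-if-absent, then append" step is exactly one Dict.modify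
theorem pv_step_eq (d : PySem.Dict Int (List String)) (k : Int) (f : List String → List String) :
    (if d.contains k then d else d.insert k []).modify k [] f = d.modify k [] f := by
  by_cases h : d.contains k = true
  · simp [h]
  · simp only [Bool.not_eq_true] at h
    simp only [h, if_neg Bool.false_ne_true, PySem.Dict.modify,
      PySem.Dict.getD_insert_self, PySem.Dict.insert_insert_self,
      PySem.Dict.getD_of_not_contains d _ h]

-- value agreement: filtering the (string, key) zip by key = filtering the (key, string) pairs
theorem pv_val_eq (l : List String) (c : Int) :
    ((l.zip (l.map pvOrdSum)).filter (fun p => p.2 == c)).map (fun p => p.1)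
      = ((l.map (fun s => (pvOrdSum s, s))).filter (fun p => p.1 == c)).map (fun p => p.2) := by
  induction l with
  | nil => rfl
  | cons x xs ih =>
      by_cases h : pvOrdSum x == c <;> simp [h, ih]

theorem my_hash_map_eq_alt (l : List String) : my_hash_map l = my_hash_map_alt l := by
  unfold my_hash_map my_hash_map_alt
  have hstep : (l.foldl
      (fun hash_dict s =>
        let hash_val := pvOrdSum s
        let hash_dict' := if hash_dict.contains hash_val then hash_dict
                          else hash_dict.insert hash_val []
        hash_dict'.modify hash_val [] (fun t => t ++ [s]))
      PySem.Dict.empty)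
      = (l.map (fun s => (pvOrdSum s, s))).foldl
          (fun d p => d.modify p.1 [] (fun t => t ++ [p.2])) PySem.Dict.empty := by
    rw [List.foldl_map]
    have hf : (fun hash_dict s =>
        let hash_val := pvOrdSum s
        let hash_dict' := if hash_dict.contains hash_val then hash_dict
                          else hash_dict.insert hash_val []
        hash_dict'.modify hash_val [] (fun t => t ++ [s]))
      = (fun (d : PySem.Dict Int (List String)) s => d.modify (pvOrdSum s) [] (fun t => t ++ [s])) :=
      funext fun d => funext fun s => pv_step_eq d (pvOrdSum s) _
    rw [hf]
  rw [hstep]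
  set pairs := l.map (fun s => (pvOrdSum s, s)) with hpairs
  set D := pairs.foldl (fun d p => d.modify p.1 [] (fun t => t ++ [p.2])) PySem.Dict.empty with hD
  have hnd : D.keys.Nodup := by
    rw [hD]
    exact PySem.Dict.nodup_keys_foldl_modify_key pairs (fun p => p.1) []
      (fun _ p t => t ++ [p.2]) PySem.Dict.empty (by simp)
  have hkeys : D.keys = PySem.List.dedup (l.map pvOrdSum) := by
    rw [hD]
    rw [PySem.Dict.keys_foldl_modify_key pairs (fun p => p.1) [] (fun _ p t => t ++ [p.2])]
    simp [hpairs, List.map_map, PySem.Set.update_nil_left, Function.comp_def]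
  rw [PySem.Dict.items_eq_map_keys D hnd [], hkeys]
  refine List.map_congr_left (fun k _ => ?_)
  have hv : D.getD k [] = (pairs.filter (fun p => p.1 == k)).map (fun p => p.2) := by
    rw [hD, PySem.Dict.getD_foldl_modify_append]
    simp
  rw [hv, hpairs, ← pv_val_eq]

-- ===== VERDICT (by name: the statement is the Claim_ definition above) =====
theorem my_hash_map_spec : Claim_equal_my_hash_map := by
  intro l _
  unfold Spec_my_hash_map
  exact my_hash_map_eq_alt l
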